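-- pv_equiv track=rewrite | github.com/ducnganv2/DATN_nganj | examples/testdata/KSAN/gen_tests.py | grouped_case
-- ===== SOURCE A (Python) =====
-- def grouped_case(groups, group_size, gap, duration):
--     arrivals = []
--     durations = []
--     for g in range(groups):
--         base = 1 + g * gap
--         for i in range(group_size):
--             arrivals.append(base)
--             durations.append(duration + i % 3)
--     return arrivals, durations
-- ===== SOURCE B (Python) =====
-- def grouped_case(groups, group_size, gap, duration):
--     if groups <= 0 or group_size <= 0:
--         return [], []
--     dpat = [duration + i % 3 for i in range(group_size)]
--     arrivals = [b for g in range(groups) for b in [1 + g * gap] * group_size]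
--     return arrivals, dpat * groups
-- ===== Notes on version B (the rewrite author's own statement) =====
-- stated objective: simpler
-- what changed: Replaces the nested per-element append loop by building one group-independent duration template and replicating it with list multiplication, and building arrivals as replicated per-group blocks.
import Mathlib
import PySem

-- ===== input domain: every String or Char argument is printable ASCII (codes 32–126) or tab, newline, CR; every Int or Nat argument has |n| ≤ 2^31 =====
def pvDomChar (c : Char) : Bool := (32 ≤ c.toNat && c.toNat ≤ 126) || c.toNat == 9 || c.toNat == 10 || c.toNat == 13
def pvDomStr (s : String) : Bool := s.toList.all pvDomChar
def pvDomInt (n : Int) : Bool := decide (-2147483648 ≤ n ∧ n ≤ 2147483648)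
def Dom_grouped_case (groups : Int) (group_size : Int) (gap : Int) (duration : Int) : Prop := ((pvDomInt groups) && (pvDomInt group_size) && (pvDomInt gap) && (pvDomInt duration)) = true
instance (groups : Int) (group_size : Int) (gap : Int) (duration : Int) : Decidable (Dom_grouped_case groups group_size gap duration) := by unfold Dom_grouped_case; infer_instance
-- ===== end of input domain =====

-- B builds one group-independent duration template and replicates blocks instead of a nested append loop; objective: simpler.
-- ===== PORT A =====
def grouped_case (groups : Int) (group_size : Int) (gap : Int) (duration : Int) : List Int × List Int :=
  (PySem.List.pyRange 0 groups 1).foldl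
    (fun (st : List Int × List Int) g =>
      let base := 1 + g * gap
      (PySem.List.pyRange 0 group_size 1).foldl
        (fun st2 i => (st2.1 ++ [base], st2.2 ++ [duration + PySem.Int.mod i 3])) st)
    ([], [])

-- ===== PORT B =====
def grouped_case_alt (groups : Int) (group_size : Int) (gap : Int) (duration : Int) : List Int × List Int :=
  if groups ≤ 0 ∨ group_size ≤ 0 then ([], []) else
  let dpat := (PySem.List.pyRange 0 group_size 1).map (fun i => duration + PySem.Int.mod i 3)
  let arrivals := (PySem.List.pyRange 0 groups 1).flatMap
    (fun g => PySem.List.pyRepeat [1 + g * gap] group_size)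
  (arrivals, PySem.List.pyRepeat dpat groups)

-- ===== PRECONDITION & SPEC =====
def Spec_grouped_case (groups : Int) (group_size : Int) (gap : Int) (duration : Int) (out : List Int × List Int) : Prop := out = grouped_case_alt groups group_size gap duration
instance (groups : Int) (group_size : Int) (gap : Int) (duration : Int) (out : List Int × List Int) : Decidable (Spec_grouped_case groups group_size gap duration out) := by unfold Spec_grouped_case; infer_instance

-- ===== CLAIM (what is proved, stated in full; the proofs are below) =====
def Claim_equal_grouped_case : Prop := ∀ (groups : Int) (group_size : Int) (gap : Int) (duration : Int), Dom_grouped_case groups group_size gap duration → Spec_grouped_case groups group_size gap duration (grouped_case groups group_size gap duration)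

-- ===== LEMMAS AND PROOFS =====
theorem pv_inner_fold (l : List Int) (c : Int) (h : Int → Int) (st : List Int × List Int) :
    l.foldl (fun st2 i => (st2.1 ++ [c], st2.2 ++ [h i])) st
      = (st.1 ++ List.replicate l.length c, st.2 ++ l.map h) := by
  induction l generalizing st with
  | nil => simp
  | cons x xs ih => simp [ih, List.replicate_succ, List.append_assoc]

theorem pv_outer_fold (L : List Int) (A : Int → List Int) (D : List Int) (st : List Int × List Int) :
    L.foldl (fun st g => (st.1 ++ A g, st.2 ++ D)) st
      = (st.1 ++ L.flatMap A, st.2 ++ (List.replicate L.length D).flatten) := by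
  induction L generalizing st with
  | nil => simp
  | cons x xs ih => simp [ih, List.replicate_succ, List.append_assoc]

-- ===== VERDICT (by name: the statement is the Claim_ definition above) =====
theorem grouped_case_spec : Claim_equal_grouped_case := by
  intro groups group_size gap duration _
  unfold Spec_grouped_case grouped_case grouped_case_alt
  simp only [pv_inner_fold, pv_outer_fold, PySem.List.pyRepeat,
    PySem.List.length_pyRange_one]
  split_ifs with h
  · rcases h with h | h
    · simp
      exact ⟨fun x _ hx => by omega, fun hg => absurd hg (by omega)⟩
    · simp [Int.toNat_of_nonpos h]
      exact fun _ => PySem.List.pyRange_one_eq_nil (by omega)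
  · norm_num
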